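-- pv_equiv track=rewrite | github.com/felipemoraes87/mvp-agent | agno_service/iam_team/coordinator.py | _required_integrations
-- ===== SOURCE A (Python) =====
-- def _required_integrations(participants: list[str]) -> list[str]:
--     mapping = {
--         "JumpCloud Directory Analyst": ["jumpcloud"],
--         "GitHub IAM Agent": ["github"],
--         "IGA Agent": ["iga"],
--         "BigQuery IAM/Security Agent": ["bigquery"],
--         "Jira/Confluence IAM Agent": ["jira", "confluence"],
--         "IAM Knowledge Agent": ["jira", "confluence", "slack", "google_drive"],
--         "IAM Risk Analyst": ["jumpcloud", "bigquery", "findings_store"],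
--         "Entitlement Reasoning Agent": [],
--         "Change Guard / Approval Agent": [],
--     }
--     deduped: list[str] = []
--     for participant in participants:
--         for integration_key in mapping.get(participant, []):
--             if integration_key not in deduped:
--                 deduped.append(integration_key)
--     return deduped
-- ===== SOURCE B (Python) =====
-- def _required_integrations(participants: list[str]) -> list[str]:
--     mapping = {
--         "JumpCloud Directory Analyst": ["jumpcloud"],
--         "GitHub IAM Agent": ["github"],
--         "IGA Agent": ["iga"],
--         "BigQuery IAM/Security Agent": ["bigquery"],
--         "Jira/Confluence IAM Agent": ["jira", "confluence"],
--         "IAM Knowledge Agent": ["jira", "confluence", "slack", "google_drive"],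
--         "IAM Risk Analyst": ["jumpcloud", "bigquery", "findings_store"],
--         "Entitlement Reasoning Agent": [],
--         "Change Guard / Approval Agent": [],
--     }
--     flat = [k for p in participants for k in mapping.get(p, [])]
--     first: dict[str, int] = {}
--     for i, k in reversed(list(enumerate(flat))):
--         first[k] = i  # walking backwards, the earliest index for each key wins
--     return sorted(first, key=first.get)
-- ===== Notes on version B (the rewrite author's own statement) =====
-- stated objective: alternative
-- what changed: Instead of deduplicating with a membership-test accumulator, B records each key's first-occurrence index in one backward overwrite pass over the enumerated flattened key stream and then sorts the keys by that index.
import Mathlib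
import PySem

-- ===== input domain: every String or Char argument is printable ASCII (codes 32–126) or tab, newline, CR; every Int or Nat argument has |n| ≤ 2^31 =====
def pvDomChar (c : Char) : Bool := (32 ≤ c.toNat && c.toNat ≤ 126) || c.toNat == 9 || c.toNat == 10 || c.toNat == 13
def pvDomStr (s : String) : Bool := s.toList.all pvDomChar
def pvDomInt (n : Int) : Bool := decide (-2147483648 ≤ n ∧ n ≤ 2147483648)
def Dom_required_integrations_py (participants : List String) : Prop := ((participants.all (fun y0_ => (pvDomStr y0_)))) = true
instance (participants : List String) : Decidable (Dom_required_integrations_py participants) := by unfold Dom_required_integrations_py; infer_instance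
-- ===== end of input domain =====

-- B replaces the membership-test dedup loop by a different algorithm: it records each key's
-- first-occurrence index with a single backward overwrite pass and sorts the keys by that index.

-- ===== PORT A =====
-- the module-level mapping dict, shared by both versions
def pvMapping : PySem.Dict String (List String) := PySem.Dict.ofList [
  ("JumpCloud Directory Analyst", ["jumpcloud"]),
  ("GitHub IAM Agent", ["github"]),
  ("IGA Agent", ["iga"]),
  ("BigQuery IAM/Security Agent", ["bigquery"]),
  ("Jira/Confluence IAM Agent", ["jira", "confluence"]),
  ("IAM Knowledge Agent", ["jira", "confluence", "slack", "google_drive"]),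
  ("IAM Risk Analyst", ["jumpcloud", "bigquery", "findings_store"]),
  ("Entitlement Reasoning Agent", []),
  ("Change Guard / Approval Agent", [])]

def required_integrations_py (participants : List String) : List String :=
  participants.foldl (fun deduped participant =>
    (PySem.Dict.getD pvMapping participant []).foldl
      (fun deduped integration_key =>
        if integration_key ∈ deduped then deduped else deduped ++ [integration_key])
      deduped) []

-- ===== PORT B =====
-- 'for i, k in reversed(list(enumerate(flat))): first[k] = i' — backward overwrite, earliest index wins
def pvFirstIdx (flat : List String) : PySem.Dict String Int :=
  (PySem.List.enumerate flat).reverse.foldl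
    (fun first q => first.insert q.2 q.1) PySem.Dict.empty

def required_integrations_py_alt (participants : List String) : List String :=
  let flat := participants.flatMap (fun p => PySem.Dict.getD pvMapping p [])
  let first := pvFirstIdx flat
  PySem.List.sorted first.keys (fun k => first.getD k 0) false

-- ===== PRECONDITION & SPEC =====
def Spec_required_integrations_py (participants : List String) (out : List String) : Prop := out = required_integrations_py_alt participants
instance (participants : List String) (out : List String) : Decidable (Spec_required_integrations_py participants out) := by unfold Spec_required_integrations_py; infer_instance

-- ===== CLAIM (what is proved, stated in full; the proofs are below) =====
def Claim_equal_required_integrations_py : Prop := ∀ (participants : List String), Dom_required_integrations_py participants → Spec_required_integrations_py participants (required_integrations_py participants)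

-- ===== LEMMAS AND PROOFS =====

-- A's inner append-if-new step is exactly PySem.Set.add
theorem pv_step_eq_add (acc : List String) (k : String) :
    (if k ∈ acc then acc else acc ++ [k]) = PySem.Set.add acc k := by
  simp [PySem.Set.add, PySem.Set.contains]

-- folding Set.add over a flatMap is the nested fold
theorem pv_foldl_flatMap (l : List String) (g : String → List String) (acc : List String) :
    (l.flatMap g).foldl PySem.Set.add acc
      = l.foldl (fun acc p => (g p).foldl PySem.Set.add acc) acc := by
  induction l generalizing acc with
  | nil => rfl
  | cons x xs ih => simp [List.flatMap_cons, List.foldl_append, ih]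

-- in the backward insert fold, the FIRST pair of ps whose key matches wins
theorem pv_get?_backfold (ps : List (Int × String)) (d0 : PySem.Dict String Int) (k : String) :
    ((ps.reverse.foldl (fun d (q : Int × String) => d.insert q.2 q.1) d0).get? k)
      = (match ps.find? (fun q => q.2 == k) with
         | some q => some q.1
         | none => d0.get? k) := by
  rw [List.foldl_reverse]
  induction ps with
  | nil => rfl
  | cons p ps ih =>
    rw [List.foldr_cons, List.find?_cons]
    simp only [PySem.Dict.get?_insert]
    by_cases h : p.2 = k
    · subst h; simp
    · have hne : k ≠ p.2 := fun hk => h hk.symm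
      have hb : (p.2 == k) = false := beq_eq_false_iff_ne.mpr h
      rw [if_neg hne, ih]
      simp only [hb]

-- find? over enumerate returns the first-occurrence index
theorem pv_find?_enumerate (l : List String) (k : String) (s : Int) (h : k ∈ l) :
    (PySem.List.enumerate l s).find? (fun q => q.2 == k)
      = some (s + (l.idxOf k : Int), k) := by
  induction l generalizing s with
  | nil => cases h
  | cons x xs ih =>
    rw [PySem.List.enumerate_cons, List.find?_cons]
    by_cases hx : x = k
    · simp [hx]
    · have hk : k ∈ xs := by
        rcases List.mem_cons.mp h with h1 | h1
        · exact absurd h1.symm hx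
        · exact h1
      have : (x == k) = false := by simp [hx]
      simp only [this, ih _ hk, List.idxOf_cons, Bool.cond_eq_ite]
      congr 1
      push_cast
      ring_nf

theorem pv_find?_enumerate_none (l : List String) (k : String) (s : Int) (h : k ∉ l) :
    (PySem.List.enumerate l s).find? (fun q => q.2 == k) = none := by
  apply List.find?_eq_none.mpr
  intro q hq
  rcases (PySem.List.mem_enumerate_iff _ _ _).mp hq with ⟨j, hj, rfl⟩
  simp only [beq_iff_eq]
  intro hek
  exact h (hek ▸ List.getElem_mem hj)

theorem pv_get?_first_of_mem (l : List String) (k : String) (h : k ∈ l) :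
    (pvFirstIdx l).get? k = some (l.idxOf k : Int) := by
  unfold pvFirstIdx
  rw [pv_get?_backfold, pv_find?_enumerate l k 0 h]
  simp

theorem pv_get?_first_of_not_mem (l : List String) (k : String) (h : k ∉ l) :
    (pvFirstIdx l).get? k = none := by
  unfold pvFirstIdx
  rw [pv_get?_backfold, pv_find?_enumerate_none l k 0 h]
  simp [PySem.Dict.get?_empty]

theorem pv_nodup_keys_first (l : List String) : (pvFirstIdx l).keys.Nodup := by
  unfold pvFirstIdx
  exact PySem.Dict.nodup_keys_foldl_insert_key ((PySem.List.enumerate l).reverse)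
    (fun q : Int × String => q.2) (fun d q => q.1) PySem.Dict.empty PySem.Dict.nodup_keys_empty

theorem pv_mem_keys_first (l : List String) (k : String) :
    k ∈ (pvFirstIdx l).keys ↔ k ∈ l := by
  constructor
  · intro hk
    by_contra hnl
    exact ((PySem.Dict.get?_eq_none_iff_not_mem_keys _ _).mp
      (pv_get?_first_of_not_mem l k hnl)) hk
  · intro hl
    by_contra hk
    have := (PySem.Dict.get?_eq_none_iff_not_mem_keys (pvFirstIdx l) k).mpr hk
    rw [pv_get?_first_of_mem l k hl] at this
    cases this

-- dedup's keys are a permutation of the dict's keys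
theorem pv_perm_dedup_keys (l : List String) :
    (PySem.List.dedup l).Perm (pvFirstIdx l).keys := by
  refine (List.perm_ext_iff_of_nodup (PySem.List.nodup_dedup l) (pv_nodup_keys_first l)).mpr ?_
  intro a
  rw [PySem.List.mem_dedup, pv_mem_keys_first]

-- along dedup l, first-occurrence indices strictly increase
theorem pv_pairwise_idxOf (l : List String) :
    (PySem.List.dedup l).Pairwise (fun a b => l.idxOf a < l.idxOf b) := by
  induction l with
  | nil => simp [PySem.List.dedup_eq_ofList, PySem.Set.ofList]
  | cons x xs ih =>
    rw [PySem.List.dedup_eq_ofList, PySem.Set.ofList_cons]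
    rw [PySem.List.dedup_eq_ofList] at ih
    refine List.Pairwise.cons ?_ ?_
    · intro b hb
      have hbx : b ≠ x := by simpa using List.of_mem_filter hb
      have hxb : (x == b) = false := beq_eq_false_iff_ne.mpr (Ne.symm hbx)
      simp [List.idxOf_cons, hxb]
    · refine (ih.filter _).imp_of_mem ?_
      intro a b ha hb hab
      have hax : a ≠ x := by simpa using List.of_mem_filter ha
      have hbx : b ≠ x := by simpa using List.of_mem_filter hb
      have hxa : (x == a) = false := beq_eq_false_iff_ne.mpr (Ne.symm hax)
      have hxb : (x == b) = false := beq_eq_false_iff_ne.mpr (Ne.symm hbx)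
      simp [List.idxOf_cons, hxa, hxb]
      omega

-- the sort key (getD of the first-index dict) strictly increases along dedup l
theorem pv_pairwise_key (l : List String) :
    (PySem.List.dedup l).Pairwise
      (fun a b => (pvFirstIdx l).getD a 0 < (pvFirstIdx l).getD b 0) := by
  refine (pv_pairwise_idxOf l).imp_of_mem ?_
  intro a b ha hb hab
  have ha' : a ∈ l := (PySem.List.mem_dedup l a).mp ha
  have hb' : b ∈ l := (PySem.List.mem_dedup l b).mp hb
  rw [PySem.Dict.getD_eq_get?_getD, PySem.Dict.getD_eq_get?_getD,
    pv_get?_first_of_mem l a ha', pv_get?_first_of_mem l b hb']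
  simpa using hab

-- ===== VERDICT (by name: the statement is the Claim_ definition above) =====
theorem required_integrations_py_spec : Claim_equal_required_integrations_py := by
  intro participants _
  unfold Spec_required_integrations_py required_integrations_py required_integrations_py_alt
  have hA : participants.foldl (fun deduped participant =>
      (PySem.Dict.getD pvMapping participant []).foldl
        (fun deduped integration_key =>
          if integration_key ∈ deduped then deduped else deduped ++ [integration_key])
        deduped) []
      = PySem.List.dedup (participants.flatMap (fun p => PySem.Dict.getD pvMapping p [])) := by
    rw [PySem.List.dedup_eq_ofList, PySem.Set.ofList_eq_foldl, pv_foldl_flatMap]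
    symm
    apply PySem.List.foldl_congr_mem
    intro acc p _
    apply PySem.List.foldl_congr_mem
    intro acc2 k _
    exact (pv_step_eq_add acc2 k).symm
  rw [hA]
  symm
  exact PySem.List.sorted_eq_of_perm_of_pairwise_lt _ _ _
    (pv_perm_dedup_keys _) (pv_pairwise_key _)
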